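-- pv_equiv track=rewrite | github.com/sboosali/python-notes | parse.py | get_max_spaces
-- ===== SOURCE A (Python) =====
-- import itertools
--
-- def get_max_spaces(line: str):
--     '''returns the maximum number of spaces in the line.
--
--     >>> get_max_spaces('  ')
--     2
--     '''
--     if ' ' in line:
--         return max(len(list(xs))
--                    for x,xs
--                    in itertools.groupby(line)
--                    if x==' ')
--     else:
--         return 0
-- ===== SOURCE B (Python) =====
-- def get_max_spaces(line: str):
--     '''returns the maximum number of spaces in the line.'''
--     best = 0
--     cur = 0
--     for ch in line:
--         if ch == ' ':
--             cur += 1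
--             if cur > best:
--                 best = cur
--         else:
--             cur = 0
--     return best
-- ===== Notes on version B (the rewrite author's own statement) =====
-- stated objective: simpler
-- what changed: Replaces itertools.groupby's group-then-filter-and-max (which materializes each run as a list) with a single pass keeping a running run-length counter and best-so-far; no membership guard is needed since best stays 0 without spaces.
import Mathlib
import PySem

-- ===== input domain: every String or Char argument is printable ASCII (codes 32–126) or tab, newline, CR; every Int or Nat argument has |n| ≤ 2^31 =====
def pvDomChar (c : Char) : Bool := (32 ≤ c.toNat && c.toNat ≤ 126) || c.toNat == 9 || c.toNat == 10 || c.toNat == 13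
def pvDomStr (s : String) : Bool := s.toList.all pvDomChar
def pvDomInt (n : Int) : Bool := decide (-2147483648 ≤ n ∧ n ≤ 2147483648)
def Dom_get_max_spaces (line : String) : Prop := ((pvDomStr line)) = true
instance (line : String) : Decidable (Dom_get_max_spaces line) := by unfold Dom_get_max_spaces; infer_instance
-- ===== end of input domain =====

-- B replaces groupby's group-then-filter-and-max with a single-pass running run-length counter (simpler).

-- ===== PORT A =====
-- itertools.groupby: successive (key, group) pairs of equal adjacent elements
def pyGroupby : List Char → List (Char × List Char)
  | [] => []
  | c :: rest =>
      (c, c :: rest.takeWhile (fun d => d = c)) :: pyGroupby (rest.dropWhile (fun d => d = c))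
termination_by l => l.length
decreasing_by
  have := List.length_dropWhile_le (fun d => d = c) rest
  simp; omega

def get_max_spaces (line : String) : Int :=
  let l := line.toList
  if ' ' ∈ l then
    -- max(len(list(xs)) for x,xs in groupby(line) if x==' '); Python's max is a left fold
    match (pyGroupby l).filterMap
        (fun g => if g.1 = ' ' then some ((g.2.length : Int)) else none) with
    | [] => 0  -- unreachable: the guard ' ' ∈ l guarantees a space group
    | v :: vs => vs.foldl max v
  else 0

-- ===== PORT B =====
def loopB (best cur : Int) : List Char → Int
  | [] => best
  | c :: rest => if c = ' ' then loopB (max best (cur + 1)) (cur + 1) rest else loopB best 0 rest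

def get_max_spaces_alt (line : String) : Int := loopB 0 0 line.toList

-- ===== PRECONDITION & SPEC =====
def Spec_get_max_spaces (line : String) (out : Int) : Prop := out = get_max_spaces_alt line
instance (line : String) (out : Int) : Decidable (Spec_get_max_spaces line out) := by unfold Spec_get_max_spaces; infer_instance

-- ===== CLAIM (what is proved, stated in full; the proofs are below) =====
def Claim_equal_get_max_spaces : Prop := ∀ (line : String), Dom_get_max_spaces line → Spec_get_max_spaces line (get_max_spaces line)

-- ===== LEMMAS AND PROOFS =====

-- abstract description of B's running state: max space-run given current run length `cur`
def fmax : List Char → Int → Int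
  | [], _ => 0
  | c :: rest, cur => if c = ' ' then max (cur + 1) (fmax rest (cur + 1)) else fmax rest 0

theorem fmax_nonneg : ∀ (l : List Char) (cur : Int), 0 ≤ fmax l cur := by
  intro l
  induction l with
  | nil => intro cur; simp [fmax]
  | cons c rest ih =>
      intro cur
      by_cases h : c = ' ' <;> simp [fmax, h]
      · exact Or.inr (ih (cur + 1))
      · exact ih 0

theorem loopB_eq : ∀ (l : List Char) (best cur : Int), 0 ≤ best →
    loopB best cur l = max best (fmax l cur) := by
  intro l
  induction l with
  | nil => intro best cur hb; simp [loopB, fmax]; omega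
  | cons c rest ih =>
      intro best cur hb
      by_cases h : c = ' '
      · have h1 : (0:Int) ≤ max best (cur + 1) := le_trans hb (le_max_left _ _)
        simp only [loopB, fmax, h, if_true, ih _ _ h1]
        omega
      · simp [loopB, fmax, h, ih _ _ hb]

def gval (g : Char × List Char) : Int := if g.1 = ' ' then (g.2.length : Int) else 0

theorem le_foldr_max : ∀ (l : List Int) (a : Int), a ≤ l.foldr max a := by
  intro l a
  induction l with
  | nil => simp
  | cons x t ih => simp [List.foldr]; omega

-- a space run followed by a non-space (or nothing)
theorem fmax_space_run : ∀ (t d : List Char) (cur : Int),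
    (∀ x ∈ t, x = ' ') → (∀ h, d.head? = some h → h ≠ ' ') →
    fmax (' ' :: t ++ d) cur = max (cur + 1 + t.length) (fmax d 0) := by
  intro t
  induction t with
  | nil =>
      intro d cur _ hd
      match d with
      | [] => simp [fmax]
      | h :: d' =>
          have : h ≠ ' ' := hd h rfl
          simp [fmax, this]
  | cons x t' ih =>
      intro d cur ht hd
      have hx : x = ' ' := ht x (by simp)
      have ht' : ∀ y ∈ t', y = ' ' := fun y hy => ht y (by simp [hy])
      have : fmax (' ' :: (x :: t') ++ d) cur
          = max (cur + 1) (fmax (' ' :: t' ++ d) (cur + 1)) := by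
        simp [fmax, hx]
      rw [this, ih d (cur + 1) ht' hd]
      simp
      omega

-- a nonempty non-space run resets the counter
theorem fmax_nonspace_run : ∀ (t d : List Char) (cur : Int),
    t ≠ [] → (∀ x ∈ t, x ≠ ' ') → fmax (t ++ d) cur = fmax d 0 := by
  intro t
  induction t with
  | nil => intro d cur h; exact absurd rfl h
  | cons x t' ih =>
      intro d cur _ ht
      have hx : x ≠ ' ' := ht x (by simp)
      have : fmax ((x :: t') ++ d) cur = fmax (t' ++ d) 0 := by simp [fmax, hx]
      rw [this]
      match t' with
      | [] => simp
      | y :: t'' => exact ih d 0 (by simp) (fun z hz => ht z (by simp [hz]))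

theorem pyGroupby_nil : pyGroupby [] = [] := by
  rw [pyGroupby.eq_def]

theorem pyGroupby_cons (c : Char) (rest : List Char) :
    pyGroupby (c :: rest)
      = (c, c :: rest.takeWhile (fun d => d = c)) :: pyGroupby (rest.dropWhile (fun d => d = c)) := by
  rw [pyGroupby.eq_def]

theorem fmax_eq_gb : ∀ (n : Nat) (l : List Char), l.length ≤ n →
    fmax l 0 = ((pyGroupby l).map gval).foldr max 0 := by
  intro n
  induction n with
  | zero =>
      intro l hl
      have : l = [] := List.eq_nil_of_length_eq_zero (Nat.le_zero.mp hl)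
      subst this; simp [fmax, pyGroupby_nil]
  | succ n ih =>
      intro l hl
      match l with
      | [] => simp [fmax, pyGroupby_nil]
      | c :: rest =>
          have hsplit : rest.takeWhile (fun d => d = c) ++ rest.dropWhile (fun d => d = c) = rest :=
            List.takeWhile_append_dropWhile
          have hlen : (rest.dropWhile (fun d => d = c)).length ≤ n := by
            have := List.length_dropWhile_le (fun d => d = c) rest
            simp at hl; omega
          have hhd : ∀ h, (rest.dropWhile (fun d => d = c)).head? = some h → h ≠ c := by
            intro h hh
            have := List.head?_dropWhile_not (fun d => d = c) rest
            rw [hh] at this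
            simpa using this
          have htw : ∀ x ∈ rest.takeWhile (fun d => d = c), x = c := by
            intro x hx
            have := List.mem_takeWhile_imp hx
            simpa using this
          have hgb := pyGroupby_cons c rest
          by_cases hc : c = ' '
          · subst hc
            have hl' : fmax (' ' :: rest) 0
                = max ((0:Int) + 1 + (rest.takeWhile (fun d => d = ' ')).length)
                      (fmax (rest.dropWhile (fun d => d = ' ')) 0) := by
              conv_lhs => rw [← hsplit]
              exact fmax_space_run _ _ 0 htw hhd
            rw [hl', ih _ hlen, hgb]
            simp [gval]
            omega
          · have hl' : fmax (c :: rest) 0 = fmax (rest.dropWhile (fun d => d = c)) 0 := by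
              conv_lhs => rw [show c :: rest = (c :: rest.takeWhile (fun d => d = c)) ++ rest.dropWhile (fun d => d = c) by simp [hsplit]]
              refine fmax_nonspace_run _ _ 0 (by simp) ?_
              intro x hx
              rcases List.mem_cons.mp hx with h | h
              · rw [h]; exact hc
              · rw [htw x h]; exact hc
            rw [hl', ih _ hlen, hgb]
            have h0 : (0:Int) ≤ (((pyGroupby (rest.dropWhile (fun d => d = c))).map gval).foldr max 0) :=
              le_foldr_max _ 0
            simp [gval, hc]
            omega

-- dropping the zero entries (non-space groups) does not change the foldr-max
theorem foldr_max_filterMap : ∀ (gs : List (Char × List Char)),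
    ((gs.map gval).foldr max 0)
      = ((gs.filterMap (fun g => if g.1 = ' ' then some ((g.2.length : Int)) else none)).foldr max 0) := by
  intro gs
  induction gs with
  | nil => rfl
  | cons g t ih =>
      by_cases h : g.1 = ' '
      · simp [gval, h, ih]
      · have h0 : (0:Int) ≤ ((t.filterMap (fun g => if g.1 = ' ' then some ((g.2.length : Int)) else none)).foldr max 0) :=
          le_foldr_max _ 0
        simp [gval, h, ih]
        omega

theorem foldl_max_eq_foldr : ∀ (vs : List Int) (v : Int), 0 ≤ v →
    vs.foldl max v = max v (vs.foldr max 0) := by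
  intro vs
  induction vs with
  | nil => intro v hv; simp; omega
  | cons x t ih =>
      intro v hv
      have : (0:Int) ≤ max v x := le_trans hv (le_max_left _ _)
      simp only [List.foldl, List.foldr, ih _ this]
      omega

theorem fmax_no_space : ∀ (l : List Char) (cur : Int), ' ' ∉ l → fmax l cur = 0 := by
  intro l
  induction l with
  | nil => intro cur _; rfl
  | cons c rest ih =>
      intro cur h
      have hc : c ≠ ' ' := fun hc => h (by simp [hc])
      have : ' ' ∉ rest := fun hr => h (by simp [hr])
      simp [fmax, hc, ih _ this]

-- ===== VERDICT (by name: the statement is the Claim_ definition above) =====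
theorem get_max_spaces_spec : Claim_equal_get_max_spaces := by
  intro line _
  unfold Spec_get_max_spaces get_max_spaces get_max_spaces_alt
  rw [loopB_eq _ 0 0 le_rfl]
  simp only []
  by_cases hmem : ' ' ∈ line.toList
  · simp only [hmem, if_true]
    have hA := fmax_eq_gb line.toList.length line.toList le_rfl
    rw [foldr_max_filterMap] at hA
    cases hvals : (pyGroupby line.toList).filterMap
        (fun g => if g.1 = ' ' then some ((g.2.length : Int)) else none) with
    | nil =>
        rw [hvals] at hA
        simp at hA
        show (0:Int) = max 0 (fmax line.toList 0)
        simp [hA]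
    | cons v vs =>
        rw [hvals] at hA
        have hv : (0:Int) ≤ v := by
          -- every filtered value is a list length cast to Int
          have : v ∈ (pyGroupby line.toList).filterMap
              (fun g => if g.1 = ' ' then some ((g.2.length : Int)) else none) := by
            rw [hvals]; simp
          rcases List.mem_filterMap.mp this with ⟨g, _, hg⟩
          by_cases h : g.1 = ' ' <;> simp [h] at hg
          omega
        show vs.foldl max v = max 0 (fmax line.toList 0)
        rw [foldl_max_eq_foldr vs v hv]
        have hf : (0:Int) ≤ fmax line.toList 0 := fmax_nonneg _ _
        simp only [List.foldr] at hA
        omega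
  · simp only [hmem, if_false]
    rw [fmax_no_space _ _ hmem]
    simp
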